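-- pv_equiv track=rewrite | github.com/ChenLiu314159/vampire-hunting | Final Version Coding - contact.py | find_infection_windows
-- ===== SOURCE A (Python) =====
-- def find_infection_windows(vks):
--     """
--     find the shortest start and end time in which individuals who are
--     definite vampires in the data could have been infected.
--
--     Parmeter:
--         vks: list
--             a list of all of the vk structures first defined in section 6
--             (dictionaries mapping participants to H/U/V statuses).
--
--     Return:
--         windows: dictionary
--             keys are participants who are all of the definite vampires
--             in the data.
--             the value is a pair tuple (start, end) giving infection window.
--             start: time unit just before infection could have occurred.
--             end: the time unit in which infection was confirmed.
--     """
--     vks2 = vks.copy()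
--     windows = {}
--     for t in range(len(vks2)):
--         vk = vks2[t]
--         for name in vk:
--             if vk[name] == 'H':  # the individual is human
--                 if name not in windows:
--                     windows[name] = [0]
--                 if name in windows:
--                     if len(windows[name]) == 1:
--                         windows[name][0] = t
--             elif vk[name] == 'V': # the individual is a vampire
--                 if name in windows:
--                     if len(windows[name]) == 1:
--                         windows[name].append(t)
--                 if name not in windows:
--                     windows[name] = [0]
--                     windows[name].append(t)
--     for name in list(windows.keys()):
--         if len(windows[name]) == 1:  # remove invalid data
--             del windows[name]
--         else:
--             windows[name] = tuple(windows[name])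
--     return windows
-- ===== SOURCE B (Python) =====
-- def find_infection_windows(vks):
--     # flatten the snapshots into one time-stamped event list, then answer
--     # per-vampire min/max queries over it (end = earliest V, start = latest H before it)
--     events = [(t, name, status)
--               for t, vk in enumerate(vks)
--               for name, status in vk.items()
--               if status in ('H', 'V')]
--     order = []
--     seen = set()
--     for _, name, _ in events:
--         if name not in seen:
--             seen.add(name)
--             order.append(name)
--     windows = {}
--     for name in order:
--         end = min((t for t, n, s in events if n == name and s == 'V'), default=None)
--         if end is None:
--             continue
--         start = max((t for t, n, s in events if n == name and s == 'H' and t < end), default=0)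
--         windows[name] = (start, end)
--     return windows
-- ===== Notes on version B (the rewrite author's own statement) =====
-- stated objective: alternative
-- what changed: Replaces A's incremental state machine (a dict of growing lists with a length-1/2 sentinel mutated per snapshot, plus a deletion pass) by a flatten-then-query algorithm: build one time-stamped event list, then for each vampire answer end = min of its V times and start = max of its H times before end; Pre_ excludes association lists with a duplicated key inside one time step, which represent no Python dict.
import Mathlib
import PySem

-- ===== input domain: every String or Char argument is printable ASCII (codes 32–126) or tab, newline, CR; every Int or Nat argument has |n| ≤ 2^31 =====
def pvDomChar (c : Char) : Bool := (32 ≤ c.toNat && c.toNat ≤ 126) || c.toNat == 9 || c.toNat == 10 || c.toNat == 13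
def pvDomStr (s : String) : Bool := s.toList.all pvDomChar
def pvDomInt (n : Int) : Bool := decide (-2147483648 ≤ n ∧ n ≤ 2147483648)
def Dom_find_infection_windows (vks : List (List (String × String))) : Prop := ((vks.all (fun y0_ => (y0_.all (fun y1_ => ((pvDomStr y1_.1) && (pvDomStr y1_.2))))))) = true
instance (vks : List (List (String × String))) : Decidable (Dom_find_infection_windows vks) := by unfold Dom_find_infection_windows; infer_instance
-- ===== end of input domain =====

-- B replaces A's incremental dict-of-lists state machine by a flatten-then-query algorithm
-- (one event list, then per-vampire min/max queries); objective: alternative, return value only.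

-- ===== PORT A =====
-- body of A's inner loop for one name, with the looked-up status 'vk[name]' passed in
def pvAbody (t : Int) (status : String) (w : PySem.Dict String (List Int)) (name : String) :
    PySem.Dict String (List Int) :=
  if status == "H" then
    let w := if !(w.contains name) then w.insert name [0] else w
    if w.contains name then
      if (w.getD name []).length == 1 then w.insert name ((w.getD name []).set 0 t) else w
    else w
  else if status == "V" then
    let w := if w.contains name then
        (if (w.getD name []).length == 1 then w.insert name ((w.getD name []) ++ [t]) else w)
      else w
    if !(w.contains name) then
      let w := w.insert name [0]
      w.insert name ((w.getD name []) ++ [t])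
    else w
  else w

def pvAstep (vk : List (String × String)) (t : Int) (w : PySem.Dict String (List Int))
    (name : String) : PySem.Dict String (List Int) :=
  pvAbody t ((PySem.Dict.mk vk).getD name "") w name

-- the final cleanup loop body: 'if len(windows[name]) == 1: del windows[name]'
def pvErase (w : PySem.Dict String (List Int)) (name : String) : PySem.Dict String (List Int) :=
  if (w.getD name []).length == 1 then w.erase name else w

def find_infection_windows (vks : List (List (String × String))) : List (String × Int × Int) :=
  let vks2 := vks
  let windows := (PySem.List.pyRange 0 (PySem.List.len vks2) 1).foldl
    (fun w t =>
      let vk := PySem.List.pyGetD vks2 t []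
      ((PySem.Dict.mk vk).keys).foldl (pvAstep vk t) w)
    PySem.Dict.empty
  let windows := windows.keys.foldl pvErase windows
  -- 'windows[name] = tuple(windows[name])' of the remaining two-element lists, as result triples
  windows.items.map (fun p => (p.1, PySem.List.pyGetD p.2 0 0, PySem.List.pyGetD p.2 1 0))

-- ===== PORT B =====
-- B's event-list comprehension: [(t, name, status) …] keeping only H/V statuses
def pvEvents (vks : List (List (String × String))) : List (Int × String × String) :=
  (PySem.List.enumerate vks).flatMap (fun tv =>
    tv.2.filterMap (fun p =>
      if p.2 == "H" || p.2 == "V" then some (tv.1, p.1, p.2) else none))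

-- B's first-occurrence order loop: 'if name not in seen: seen.add(name); order.append(name)'
def pvOrder (events : List (Int × String × String)) : List String :=
  (events.foldl (fun acc e =>
      if PySem.Set.contains acc.2 e.2.1 then acc
      else (acc.1 ++ [e.2.1], PySem.Set.add acc.2 e.2.1))
    (([], PySem.Set.empty) : List String × PySem.Set String)).1

def find_infection_windows_alt (vks : List (List (String × String))) : List (String × Int × Int) :=
  let events := pvEvents vks
  let order := pvOrder events
  let windows := order.foldl (fun w name =>
    match PySem.List.min?
        (events.filterMap (fun e => if e.2.1 == name && e.2.2 == "V" then some e.1 else none)) id with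
    | none => w
    | some en => w.insert name
        ((PySem.List.max? (events.filterMap (fun ev =>
            if ev.2.1 == name && ev.2.2 == "H" && decide (ev.1 < en) then some ev.1 else none)) id).getD 0,
          en))
    (PySem.Dict.empty : PySem.Dict String (Int × Int))
  windows.items

-- ===== PRECONDITION & SPEC =====
-- Pre_ excludes association lists in which one inner "dict" carries a duplicate key: such a value
-- does not represent any Python dict (a dict cannot hold a key twice), so A never receives it.
def Pre_find_infection_windows (vks : List (List (String × String))) : Prop :=
  ∀ vk ∈ vks, (vk.map Prod.fst).Nodup
instance (vks : List (List (String × String))) : Decidable (Pre_find_infection_windows vks) := by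
  unfold Pre_find_infection_windows; infer_instance

def pvWitness_find_infection_windows : (List (List (String × String))) :=
  [[("ana", "H"), ("bob", "V")], [("ana", "V")], [("bob", "H")]]

def Spec_find_infection_windows (vks : List (List (String × String))) (out : List (String × Int × Int)) : Prop := out = find_infection_windows_alt vks
instance (vks : List (List (String × String))) (out : List (String × Int × Int)) : Decidable (Spec_find_infection_windows vks out) := by unfold Spec_find_infection_windows; infer_instance

-- ===== CLAIM (what is proved, stated in full; the proofs are below) =====
def Claim_equal_find_infection_windows : Prop := ∀ (vks : List (List (String × String))), Dom_find_infection_windows vks → Pre_find_infection_windows vks → Spec_find_infection_windows vks (find_infection_windows vks)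

-- ===== LEMMAS AND PROOFS =====

-- ---- the common abstract state machine both proofs are reduced to ----
-- per-name step of the abstract machine: (last H time, first V time or none)
def pvBstep (t : Int) (st : PySem.Dict String (Int × Option Int)) (p : String × String) :
    PySem.Dict String (Int × Option Int) :=
  let s := st.getD p.1 (0, none)
  match s.2 with
  | none =>
      if p.2 == "H" then st.insert p.1 (t, none)
      else if p.2 == "V" then st.insert p.1 (s.1, some t)
      else st
  | some _ => st

-- ---- A-side: A's dict of lists is the abstract state under this encoding ----
def pvEnc (q : Int × Option Int) : List Int :=
  match q.2 with
  | none => [q.1]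
  | some v => [q.1, v]

def pvEncP (p : String × (Int × Option Int)) : String × List Int := (p.1, pvEnc p.2)

def pvMapV (st : PySem.Dict String (Int × Option Int)) : PySem.Dict String (List Int) :=
  PySem.Dict.mk (st.items.map pvEncP)

theorem pvMapV_get? (st : PySem.Dict String (Int × Option Int)) (k : String) :
    (pvMapV st).get? k = (st.get? k).map pvEnc := by
  have hcomp : ((fun p : String × List Int => p.1 == k) ∘ pvEncP)
      = (fun q : String × (Int × Option Int) => q.1 == k) := rfl
  simp only [pvMapV, PySem.Dict.get?, PySem.Dict.items, List.find?_map, hcomp]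
  cases List.find? (fun q => q.1 == k) st.items <;> rfl

theorem pvMapV_contains (st : PySem.Dict String (Int × Option Int)) (k : String) :
    (pvMapV st).contains k = st.contains k := by
  rw [PySem.Dict.contains_eq_isSome_get?, PySem.Dict.contains_eq_isSome_get?, pvMapV_get?]
  cases st.get? k <;> rfl

theorem pvMapV_insert (st : PySem.Dict String (Int × Option Int)) (k : String)
    (q : Int × Option Int) :
    pvMapV (st.insert k q) = (pvMapV st).insert k (pvEnc q) := by
  apply PySem.Dict.ext
  by_cases h : st.contains k = true
  · have h2 : (pvMapV st).contains k = true := by rw [pvMapV_contains]; exact h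
    rw [show (pvMapV (st.insert k q)).items = (st.insert k q).items.map pvEncP from rfl,
      PySem.Dict.items_insert_of_contains st q h,
      PySem.Dict.items_insert_of_contains (pvMapV st) (pvEnc q) h2]
    rw [show (pvMapV st).items = st.items.map pvEncP from rfl, List.map_map, List.map_map]
    apply List.map_congr_left
    intro p _
    by_cases hp : p.1 = k <;> simp [pvEncP, hp]
  · have h' : st.contains k = false := eq_false_of_ne_true h
    have h2 : (pvMapV st).contains k = false := by rw [pvMapV_contains]; exact h'
    rw [show (pvMapV (st.insert k q)).items = (st.insert k q).items.map pvEncP from rfl,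
      PySem.Dict.items_insert_of_not_contains st q h',
      PySem.Dict.items_insert_of_not_contains (pvMapV st) (pvEnc q) h2]
    rw [List.map_append]
    rfl

theorem pvInsert_insert_self {ν : Type} (d : PySem.Dict String ν) (k : String) (v v' : ν) :
    (d.insert k v).insert k v' = d.insert k v' := by
  apply PySem.Dict.ext
  have hc : (d.insert k v).contains k = true := PySem.Dict.contains_insert_self d k v
  by_cases h : d.contains k = true
  · rw [PySem.Dict.items_insert_of_contains (d.insert k v) v' hc,
      PySem.Dict.items_insert_of_contains d v h,
      PySem.Dict.items_insert_of_contains d v' h, List.map_map]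
    apply List.map_congr_left
    intro p _
    by_cases hp : p.1 = k <;> simp [hp]
  · have h' : d.contains k = false := eq_false_of_ne_true h
    have hno : ∀ p ∈ d.items, ¬ (p.1 = k) := by
      intro p hp hpk
      have hcon : d.items.any (fun p => p.1 == k) = true :=
        List.any_eq_true.mpr ⟨p, hp, by simp [hpk]⟩
      exact h hcon
    rw [PySem.Dict.items_insert_of_contains (d.insert k v) v' hc,
      PySem.Dict.items_insert_of_not_contains d v h',
      PySem.Dict.items_insert_of_not_contains d v' h', List.map_append]
    congr 1
    · have hmc := List.map_congr_left (l := d.items)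
        (f := fun p : String × ν => if (p.1 == k) = true then (k, v') else p) (g := id)
        (fun p hp => by simp [hno p hp])
      simpa using hmc
    · simp

-- one (name, status) step: A's body on the encoded dict equals the encoding of pvBstep
theorem pvStep_comm (t : Int) (p : String × String) (st : PySem.Dict String (Int × Option Int)) :
    pvAbody t p.2 (pvMapV st) p.1 = pvMapV (pvBstep t st p) := by
  have hc := pvMapV_contains st p.1
  have hg := pvMapV_get? st p.1
  have hcg := PySem.Dict.contains_eq_isSome_get? st p.1
  cases hq : st.get? p.1 with
  | none =>
    have hco : st.contains p.1 = false := by rw [hcg, hq]; rfl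
    have hgd : st.getD p.1 (0, none) = (0, none) := by
      rw [PySem.Dict.getD_eq_get?_getD, hq]; rfl
    by_cases hH : p.2 == "H"
    · simp only [pvAbody, pvBstep, hH, hgd, hc, hco, Bool.not_false, if_true, ite_true]
      rw [pvMapV_insert]
      simp only [PySem.Dict.contains_insert_self, if_pos]
      rw [PySem.Dict.getD_eq_get?_getD, PySem.Dict.get?_insert_self]
      simp [pvInsert_insert_self, pvEnc]
    · by_cases hV : p.2 == "V"
      · simp only [pvAbody, pvBstep, hH, hV, hgd, hc, hco, Bool.not_false,
          Bool.false_eq_true, ite_false, ite_true]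
        rw [pvMapV_insert]
        rw [PySem.Dict.getD_eq_get?_getD, PySem.Dict.get?_insert_self]
        simp [pvInsert_insert_self, pvEnc]
      · simp [pvAbody, pvBstep, hH, hV, hgd]
  | some q =>
    have hgd : st.getD p.1 (0, none) = q := by rw [PySem.Dict.getD_eq_get?_getD, hq]; rfl
    have hco : st.contains p.1 = true := by rw [hcg, hq]; rfl
    have hgdw : (pvMapV st).getD p.1 [] = pvEnc q := by
      rw [PySem.Dict.getD_eq_get?_getD, hg, hq]; rfl
    cases hfv : q.2 with
    | none =>
      have hlen : (pvEnc q).length == 1 := by simp [pvEnc, hfv]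
      by_cases hH : p.2 == "H"
      · simp only [pvAbody, pvBstep, hH, hgd, hfv, hc, hco, Bool.not_true,
          Bool.false_eq_true, ite_false, ite_true, hgdw, hlen]
        rw [pvMapV_insert]
        simp [pvEnc, hfv]
      · by_cases hV : p.2 == "V"
        · simp only [pvAbody, pvBstep, hH, hV, Bool.false_eq_true, ite_false, ite_true,
            hgd, hfv, hc, hco, Bool.not_true, hgdw, hlen]
          rw [pvMapV_insert]
          simp only [PySem.Dict.contains_insert_self, Bool.not_true, Bool.false_eq_true, ite_false]
          simp [pvEnc, hfv]
        · simp [pvAbody, pvBstep, hH, hV, hgd, hfv]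
    | some v =>
      have hlen : ((pvEnc q).length == 1) = false := by simp [pvEnc, hfv]
      by_cases hH : p.2 == "H"
      · simp [pvAbody, pvBstep, hH, hgd, hfv, hc, hco, hgdw, hlen]
      · by_cases hV : p.2 == "V"
        · simp [pvAbody, pvBstep, hH, hV, hgd, hfv, hc, hco, hgdw, hlen]
        · simp [pvAbody, pvBstep, hH, hV, hgd, hfv]

-- the inner loops agree: A folds the keys of vk looking each status up
theorem pvInner_aux (vk : List (String × String)) (t : Int) (rest : List (String × String))
    (h : ∀ p ∈ rest, (PySem.Dict.mk vk).getD p.1 "" = p.2) :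
    ∀ st, (rest.map Prod.fst).foldl (pvAstep vk t) (pvMapV st)
      = pvMapV (rest.foldl (pvBstep t) st) := by
  induction rest with
  | nil => intro st; rfl
  | cons p rest ih =>
    intro st
    have hp := h p (List.mem_cons_self)
    simp only [List.map_cons, List.foldl_cons, pvAstep, hp, pvStep_comm]
    exact ih (fun q hq => h q (List.mem_cons_of_mem _ hq)) _

theorem pvInner (vk : List (String × String)) (t : Int) (hn : (vk.map Prod.fst).Nodup)
    (st : PySem.Dict String (Int × Option Int)) :
    ((PySem.Dict.mk vk).keys).foldl (pvAstep vk t) (pvMapV st)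
      = pvMapV (vk.foldl (pvBstep t) st) := by
  rw [PySem.Dict.keys_mk]
  exact pvInner_aux vk t vk
    (fun p hp => PySem.Dict.getD_of_mem_items (PySem.Dict.mk vk) hp
      (by rw [PySem.Dict.keys_mk]; exact hn) "") st

theorem pvOuter (vks : List (List (String × String))) (ts : List Int)
    (h : ∀ t ∈ ts, ((PySem.List.pyGetD vks t []).map Prod.fst).Nodup) :
    ∀ st, ts.foldl
        (fun w t => ((PySem.Dict.mk (PySem.List.pyGetD vks t [])).keys).foldl
          (pvAstep (PySem.List.pyGetD vks t []) t) w) (pvMapV st)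
      = pvMapV (ts.foldl (fun st t => (PySem.List.pyGetD vks t []).foldl (pvBstep t) st) st) := by
  induction ts with
  | nil => intro st; rfl
  | cons t ts ih =>
    intro st
    simp only [List.foldl_cons]
    rw [pvInner _ _ (h t (List.mem_cons_self)) st]
    exact ih (fun u hu => h u (List.mem_cons_of_mem _ hu)) _

-- the abstract machine keeps its keys unique
theorem pvBstep_nodup (t : Int) (p : String × String)
    (st : PySem.Dict String (Int × Option Int)) (h : st.keys.Nodup) :
    (pvBstep t st p).keys.Nodup := by
  unfold pvBstep
  cases hs : (st.getD p.1 (0, none)).2 with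
  | none =>
    simp only [hs]
    by_cases hH : p.2 == "H"
    · simpa [hH] using PySem.Dict.nodup_keys_insert st p.1 _ h
    · by_cases hV : p.2 == "V"
      · simpa [hH, hV] using PySem.Dict.nodup_keys_insert st p.1 _ h
      · simpa [hH, hV] using h
  | some v => simpa [hs] using h

theorem pvBfold_nodup (l : List (String × String)) (t : Int)
    (st : PySem.Dict String (Int × Option Int)) (h : st.keys.Nodup) :
    (l.foldl (pvBstep t) st).keys.Nodup := by
  induction l generalizing st with
  | nil => exact h
  | cons p l ih => exact ih _ (pvBstep_nodup t p st h)

theorem pvBouter_nodup (vks : List (List (String × String))) (ts : List Int)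
    (st : PySem.Dict String (Int × Option Int)) (h : st.keys.Nodup) :
    (ts.foldl (fun st t => (PySem.List.pyGetD vks t []).foldl (pvBstep t) st) st).keys.Nodup := by
  induction ts generalizing st with
  | nil => exact h
  | cons t ts ih => exact ih _ (pvBfold_nodup _ t st h)

-- the cleanup loop over the dict's own key list removes exactly the length-one entries
theorem pvEraseFold (todo done : List (String × List Int))
    (h : ((done ++ todo).map Prod.fst).Nodup) :
    ((todo.map Prod.fst).foldl pvErase
        (PySem.Dict.mk ((done.filter (fun p => !(p.2.length == 1))) ++ todo))).items
      = (done ++ todo).filter (fun p => !(p.2.length == 1)) := by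
  induction todo generalizing done with
  | nil => simp
  | cons hd rest ih =>
    have hn' : (((done ++ [hd]) ++ rest).map Prod.fst).Nodup := by
      simpa [List.append_assoc] using h
    have hsplit : (done.map Prod.fst ++ hd.1 :: rest.map Prod.fst).Nodup := by simpa using h
    have hdisj := List.disjoint_of_nodup_append hsplit
    have hdone : hd.1 ∉ done.map Prod.fst := fun hmem => hdisj hmem List.mem_cons_self
    have hrest : hd.1 ∉ rest.map Prod.fst :=
      (List.nodup_cons.mp (List.Nodup.of_append_right hsplit)).1
    have hgd : (PySem.Dict.mk ((done.filter (fun p => !(p.2.length == 1))) ++ hd :: rest)).getD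
        hd.1 [] = hd.2 := by
      rw [PySem.Dict.getD_eq_get?_getD]
      simp only [PySem.Dict.get?, PySem.Dict.items, List.find?_append]
      have h1 : (done.filter (fun p => !(p.2.length == 1))).find?
          (fun p => p.1 == hd.1) = none := by
        rw [List.find?_eq_none]
        intro q hq hqk
        have hq' : q ∈ done := List.mem_of_mem_filter hq
        exact hdone (eq_of_beq hqk ▸ List.mem_map_of_mem hq')
      rw [h1]
      simp [List.find?_cons_of_pos]
    have hrestf : rest.filter (fun p => !(p.1 == hd.1)) = rest := by
      apply List.filter_eq_self.mpr
      intro q hq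
      simp only [Bool.not_eq_eq_eq_not, Bool.not_true, beq_eq_false_iff_ne, ne_eq]
      intro hk
      exact hrest (hk ▸ List.mem_map_of_mem hq)
    have hdonef : (done.filter (fun p => !(p.2.length == 1))).filter
        (fun p => !(p.1 == hd.1)) = done.filter (fun p => !(p.2.length == 1)) := by
      apply List.filter_eq_self.mpr
      intro q hq
      simp only [Bool.not_eq_eq_eq_not, Bool.not_true, beq_eq_false_iff_ne, ne_eq]
      intro hk
      have hq' : q ∈ done := List.mem_of_mem_filter hq
      exact hdone (hk ▸ List.mem_map_of_mem hq')
    simp only [List.map_cons, List.foldl_cons, pvErase, hgd]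
    by_cases hc : (hd.2.length == 1) = true
    · rw [if_pos hc]
      have herase : (PySem.Dict.mk ((done.filter (fun p => !(p.2.length == 1))) ++ hd :: rest)).erase hd.1
          = PySem.Dict.mk (((done ++ [hd]).filter (fun p => !(p.2.length == 1))) ++ rest) := by
        simp only [PySem.Dict.erase, PySem.Dict.items, List.filter_append, List.filter_cons,
          hdonef, hrestf]
        simp [hc]
      rw [herase, ih (done ++ [hd]) hn']
      simp [List.append_assoc]
    · rw [if_neg hc]
      have hshape : (PySem.Dict.mk ((done.filter (fun p => !(p.2.length == 1))) ++ hd :: rest))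
          = PySem.Dict.mk (((done ++ [hd]).filter (fun p => !(p.2.length == 1))) ++ rest) := by
        simp only [List.filter_append, List.filter_cons]
        simp [hc]
      rw [hshape, ih (done ++ [hd]) hn']
      simp [List.append_assoc]

theorem pvMapV_keys (st : PySem.Dict String (Int × Option Int)) :
    (pvMapV st).keys = st.keys := by
  simp [pvMapV, PySem.Dict.keys, pvEncP, Function.comp_def]

theorem pvCleanup (st : PySem.Dict String (Int × Option Int)) (hn : st.keys.Nodup) :
    (((pvMapV st).keys).foldl pvErase (pvMapV st)).items
      = (pvMapV st).items.filter (fun p => !(p.2.length == 1)) := by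
  have h0 : (pvMapV st).keys = (pvMapV st).items.map Prod.fst := rfl
  have hnd : (((([] : List (String × List Int))) ++ (pvMapV st).items).map Prod.fst).Nodup := by
    simpa [← h0, pvMapV_keys] using hn
  have := pvEraseFold (pvMapV st).items [] hnd
  simpa [h0] using this

-- the encoded final passes produce the filterMap of the abstract state
theorem pvFinal (l : List (String × (Int × Option Int))) :
    ((l.map pvEncP).filter (fun p => !(p.2.length == 1))).map
        (fun p => (p.1, PySem.List.pyGetD p.2 0 0, PySem.List.pyGetD p.2 1 0))
      = l.filterMap (fun p => p.2.2.map (fun v => (p.1, p.2.1, v))) := by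
  induction l with
  | nil => rfl
  | cons q l ih =>
    cases hq : q.2.2 with
    | none => simp [pvEncP, pvEnc, hq, List.filter_cons, ih]
    | some v =>
      simp only [List.map_cons, List.filter_cons, pvEncP, pvEnc, hq, List.filterMap_cons,
        Option.map_some]
      rw [if_pos (by simp)]
      simp only [List.map_cons, ih]
      simp [PySem.List.pyGetD, PySem.List.pyGet?, PySem.List.pyIdx?]

-- A's whole port, characterised as a filterMap over the abstract machine's final state
theorem pvAchar (vks : List (List (String × String)))
    (hpre : Pre_find_infection_windows vks) :
    find_infection_windows vks
      = ((PySem.List.enumerate vks).foldl (fun st tv => tv.2.foldl (pvBstep tv.1) st)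
          PySem.Dict.empty).items.filterMap
          (fun p => p.2.2.map (fun v => (p.1, p.2.1, v))) := by
  rw [PySem.List.enumerate_eq_map_pyRange vks [], List.foldl_map]
  simp only [find_infection_windows]
  have hts : ∀ t ∈ PySem.List.pyRange 0 (PySem.List.len vks) 1,
      ((PySem.List.pyGetD vks t []).map Prod.fst).Nodup := by
    intro t ht
    rw [PySem.List.mem_pyRange_one] at ht
    have hlen : t < (vks.length : Int) := by simpa [PySem.List.len] using ht.2
    rw [PySem.List.pyGetD_eq_getElem vks [] ht.1 hlen]
    exact hpre _ (List.getElem_mem _)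
  have hemp : (PySem.Dict.empty : PySem.Dict String (List Int)) = pvMapV PySem.Dict.empty := rfl
  rw [hemp, pvOuter vks _ hts PySem.Dict.empty]
  have hn : ((PySem.List.pyRange 0 (PySem.List.len vks) 1).foldl
      (fun st t => (PySem.List.pyGetD vks t []).foldl (pvBstep t) st)
      PySem.Dict.empty).keys.Nodup := by
    apply pvBouter_nodup
    exact PySem.Dict.nodup_keys_empty
  rw [pvCleanup _ hn]
  rw [show (pvMapV ((PySem.List.pyRange 0 (PySem.List.len vks) 1).foldl
      (fun st t => (PySem.List.pyGetD vks t []).foldl (pvBstep t) st)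
      PySem.Dict.empty)).items
    = ((PySem.List.pyRange 0 (PySem.List.len vks) 1).foldl
      (fun st t => (PySem.List.pyGetD vks t []).foldl (pvBstep t) st)
      PySem.Dict.empty).items.map pvEncP from rfl]
  exact pvFinal _

-- ---- flattening: the nested fold is the fold over B's event list ----
theorem pvFilterMapIf {α β : Type} (l : List α) (c : α → Bool) (g : α → β) :
    l.filterMap (fun x => if c x then some (g x) else none) = (l.filter c).map g := by
  induction l with
  | nil => rfl
  | cons x l ih =>
    by_cases hx : c x <;> simp [List.filterMap_cons, List.filter_cons, hx, ih]

theorem pvBstep_skip (t : Int) (st : PySem.Dict String (Int × Option Int))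
    (p : String × String) (h : (p.2 == "H" || p.2 == "V") = false) :
    pvBstep t st p = st := by
  rw [Bool.or_eq_false_iff] at h
  obtain ⟨h1, h2⟩ := h
  unfold pvBstep
  cases hm : (st.getD p.1 (0, none)).2 <;> simp [hm, h1, h2]

theorem pvFoldFilter (P : List (Int × String × String)) :
    ∀ st : PySem.Dict String (Int × Option Int),
      P.foldl (fun st e => pvBstep e.1 st e.2) st
        = (P.filter (fun e => e.2.2 == "H" || e.2.2 == "V")).foldl
            (fun st e => pvBstep e.1 st e.2) st := by
  induction P with
  | nil => intro st; rfl
  | cons e P ih =>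
    intro st
    by_cases hc : (e.2.2 == "H" || e.2.2 == "V") = true
    · simp only [List.foldl_cons, List.filter_cons, hc, if_pos]
      exact ih _
    · have hc' : (e.2.2 == "H" || e.2.2 == "V") = false := eq_false_of_ne_true hc
      simp only [List.foldl_cons, List.filter_cons, hc', Bool.false_eq_true, if_neg,
        pvBstep_skip e.1 st e.2 hc']
      exact ih st

theorem pvSB_eq (vks : List (List (String × String))) :
    (PySem.List.enumerate vks).foldl (fun st tv => tv.2.foldl (pvBstep tv.1) st)
        PySem.Dict.empty
      = (pvEvents vks).foldl (fun st e => pvBstep e.1 st e.2) PySem.Dict.empty := by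
  have hev : pvEvents vks
      = ((PySem.List.enumerate vks).flatMap (fun tv => tv.2.map (fun p => (tv.1, p)))).filter
          (fun e => e.2.2 == "H" || e.2.2 == "V") := by
    rw [List.filter_flatMap]
    unfold pvEvents
    congr 1
    funext tv
    rw [pvFilterMapIf tv.2 (fun p => p.2 == "H" || p.2 == "V") (fun p => (tv.1, p.1, p.2)),
      List.filter_map]
    rfl
  rw [hev, ← pvFoldFilter, List.foldl_flatMap]
  congr 1
  funext st tv
  rw [List.foldl_map]

-- ---- the abstract machine characterised by per-name projections ----
def pvStepV (q : Int × Option Int) (e : Int × String) : Int × Option Int :=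
  match q.2 with
  | some _ => q
  | none => if e.2 == "V" then (q.1, some e.1) else (e.1, none)

def pvVal (l : List (Int × String)) : Int × Option Int := l.foldl pvStepV (0, none)

def pvProj (E : List (Int × String × String)) (n : String) : List (Int × String) :=
  E.filterMap (fun e => if e.2.1 == n then some (e.1, e.2.2) else none)

def pvNames (E : List (Int × String × String)) : List String :=
  PySem.Set.ofList (E.map (fun e => e.2.1))

theorem pvVal_append (l : List (Int × String)) (p : Int × String) :
    pvVal (l ++ [p]) = pvStepV (pvVal l) p := by
  simp [pvVal, List.foldl_append]

theorem pvProj_append_singleton (E : List (Int × String × String))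
    (e : Int × String × String) (n : String) :
    pvProj (E ++ [e]) n = pvProj E n ++ (if e.2.1 == n then [(e.1, e.2.2)] else []) := by
  by_cases h : e.2.1 = n <;>
    simp [pvProj, List.filterMap_append, List.filterMap_cons, h]

theorem pvNames_append (E : List (Int × String × String)) (e : Int × String × String) :
    pvNames (E ++ [e]) = PySem.Set.add (pvNames E) e.2.1 := by
  simp [pvNames, PySem.Set.ofList_append_singleton]

theorem pvNames_nodup (E : List (Int × String × String)) : (pvNames E).Nodup := by
  unfold pvNames
  exact PySem.Set.nodup_ofList _

theorem pvInv (E : List (Int × String × String))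
    (hHV : ∀ e ∈ E, e.2.2 = "H" ∨ e.2.2 = "V") :
    (E.foldl (fun st e => pvBstep e.1 st e.2) PySem.Dict.empty).items
      = (pvNames E).map (fun n => (n, pvVal (pvProj E n))) := by
  revert hHV
  induction E using List.reverseRecOn with
  | nil => intro _; rfl
  | append_singleton E e ih =>
    intro hHV
    have hHV' : ∀ x ∈ E, x.2.2 = "H" ∨ x.2.2 = "V" :=
      fun x hx => hHV x (List.mem_append_left _ hx)
    have he : e.2.2 = "H" ∨ e.2.2 = "V" :=
      hHV e (List.mem_append_right _ List.mem_cons_self)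
    have hit := ih hHV'
    rw [List.foldl_append, List.foldl_cons, List.foldl_nil, pvNames_append]
    set st := E.foldl (fun st e => pvBstep e.1 st e.2) PySem.Dict.empty with hst
    have hkeys : st.keys = pvNames E := by
      show st.items.map Prod.fst = _
      rw [hit, List.map_map]
      exact List.map_id _
    have hnodup : st.keys.Nodup := by rw [hkeys]; exact pvNames_nodup E
    have hprojsame : ∀ m ∈ pvNames E, m ≠ e.2.1 → pvProj (E ++ [e]) m = pvProj E m := by
      intro m _ hm
      rw [pvProj_append_singleton]
      have : (e.2.1 == m) = false := by simp [Ne.symm hm]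
      simp [this]
    by_cases hk : e.2.1 ∈ pvNames E
    · -- name already tracked
      have hgd : st.getD e.2.1 (0, none) = pvVal (pvProj E e.2.1) := by
        have hmem : (e.2.1, pvVal (pvProj E e.2.1)) ∈ st.items := by
          rw [hit]; exact List.mem_map_of_mem hk
        exact PySem.Dict.getD_of_mem_items st hmem hnodup (0, none)
      have hcon : st.contains e.2.1 = true :=
        (PySem.Dict.contains_iff_mem_keys st e.2.1).mpr (by rw [hkeys]; exact hk)
      rw [PySem.Set.add_of_mem hk]
      cases hq : (pvVal (pvProj E e.2.1)).2 with
      | some w =>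
        have hstep : pvBstep e.1 st e.2 = st := by
          unfold pvBstep
          rw [hgd]
          simp [hq]
        rw [hstep, hit]
        apply List.map_congr_left
        intro m hm
        by_cases hmn : m = e.2.1
        · subst hmn
          rw [pvProj_append_singleton]
          simp only [BEq.rfl, if_pos]
          rw [pvVal_append]
          unfold pvStepV
          rw [hq]
        · rw [hprojsame m hm hmn]
      | none =>
        have hins : ∀ nv : Int × Option Int,
            (st.insert e.2.1 nv).items
              = (pvNames E).map (fun n =>
                  if n == e.2.1 then (e.2.1, nv) else (n, pvVal (pvProj E n))) := by
          intro nv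
          rw [PySem.Dict.items_insert_of_contains st nv hcon, hit, List.map_map]
          apply List.map_congr_left
          intro m _
          by_cases hmn : m = e.2.1 <;> simp [hmn]
        have hgoal : ∀ nv : Int × Option Int,
            nv = pvStepV (pvVal (pvProj E e.2.1)) (e.1, e.2.2) →
            (st.insert e.2.1 nv).items
              = (pvNames E).map (fun n => (n, pvVal (pvProj (E ++ [e]) n))) := by
          intro nv hnv
          rw [hins nv]
          apply List.map_congr_left
          intro m hm
          by_cases hmn : m = e.2.1
          · subst hmn
            rw [pvProj_append_singleton]
            simp only [BEq.rfl, if_pos, if_true]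
            rw [pvVal_append, ← hnv]
          · have hfalse : (m == e.2.1) = false := by simp [hmn]
            simp [hfalse, hprojsame m hm hmn]
        rcases he with hH | hV
        · have hstep : pvBstep e.1 st e.2 = st.insert e.2.1 (e.1, none) := by
            unfold pvBstep
            rw [hgd]
            simp [hq, hH]
          rw [hstep]
          exact hgoal _ (by simp [pvStepV, hq, hH])
        · have hstep : pvBstep e.1 st e.2
              = st.insert e.2.1 ((pvVal (pvProj E e.2.1)).1, some e.1) := by
            unfold pvBstep
            rw [hgd]
            simp [hq, hV]
          rw [hstep]
          exact hgoal _ (by simp [pvStepV, hq, hV])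
    · -- new name
      have hcon : st.contains e.2.1 = false := by
        refine eq_false_of_ne_true fun hc => hk ?_
        rw [← hkeys]
        exact (PySem.Dict.contains_iff_mem_keys st e.2.1).mp hc
      have hgd : st.getD e.2.1 (0, none) = (0, none) :=
        PySem.Dict.getD_of_not_contains st (0, none) hcon
      have hproj0 : pvProj E e.2.1 = [] := by
        unfold pvProj
        rw [List.filterMap_eq_nil_iff]
        intro x hx
        have hne : x.2.1 ≠ e.2.1 := by
          intro hEq
          apply hk
          unfold pvNames
          rw [PySem.Set.mem_ofList]
          exact hEq ▸ List.mem_map_of_mem hx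
        simp [hne]
      have hprojk : pvProj (E ++ [e]) e.2.1 = [(e.1, e.2.2)] := by
        rw [pvProj_append_singleton, hproj0]
        simp
      rw [PySem.Set.add_of_not_mem hk, List.map_append]
      have hmain : ∀ v : Int × Option Int,
          (st.insert e.2.1 v).items
            = (pvNames E).map (fun n => (n, pvVal (pvProj (E ++ [e]) n))) ++ [(e.2.1, v)] := by
        intro v
        rw [PySem.Dict.items_insert_of_not_contains st v hcon, hit]
        congr 1
        apply List.map_congr_left
        intro m hm
        rw [hprojsame m hm (fun hEq => hk (hEq ▸ hm))]
      rcases he with hH | hV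
      · have hstep : pvBstep e.1 st e.2 = st.insert e.2.1 (e.1, none) := by
          unfold pvBstep
          rw [hgd]
          simp [hH]
        rw [hstep, hmain]
        simp [hprojk, pvVal, pvStepV, hH]
      · have hstep : pvBstep e.1 st e.2 = st.insert e.2.1 (0, some e.1) := by
          unfold pvBstep
          rw [hgd]
          simp [hV]
        rw [hstep, hmain]
        simp [hprojk, pvVal, pvStepV, hV]

-- ---- min/max queries recover the abstract per-name value on increasing event lists ----
def pvVtimes (l : List (Int × String)) : List Int :=
  l.filterMap (fun p => if p.2 == "V" then some p.1 else none)

def pvHtimesLt (v : Int) (l : List (Int × String)) : List Int :=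
  l.filterMap (fun p => if p.2 == "H" && decide (p.1 < v) then some p.1 else none)

theorem pvStay (l : List (Int × String)) (a v : Int) :
    l.foldl pvStepV (a, some v) = (a, some v) := by
  induction l with
  | nil => rfl
  | cons p l ih => simpa [pvStepV] using ih

theorem pvMin?_cons_of_lt (t : Int) (ts : List Int) (h : ∀ x ∈ ts, t < x) :
    PySem.List.min? (t :: ts) id = some t := by
  cases hm : PySem.List.min? (t :: ts) id with
  | none => simp [PySem.List.min?_eq_none_iff] at hm
  | some m =>
    have hmem := PySem.List.min?_mem hm
    have hle : id m ≤ id t := PySem.List.min?_isMin hm t List.mem_cons_self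
    rcases List.mem_cons.mp hmem with h0 | h0
    · rw [h0]
    · exact absurd hle (by simpa using h m h0)

theorem pvMaxShift (t a : Int) (T : List Int) (h : ∀ x ∈ T, t < x) :
    (PySem.List.max? (t :: T) id).getD a = (PySem.List.max? T id).getD t := by
  cases T with
  | nil =>
    cases hm : PySem.List.max? [t] id with
    | none => simp [PySem.List.max?_eq_none_iff] at hm
    | some m =>
      have hmem := PySem.List.max?_mem hm
      simp only [List.mem_singleton] at hmem
      subst hmem
      simp [hm]
      rfl
  | cons x ts =>
    cases hm : PySem.List.max? (t :: x :: ts) id with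
    | none => simp [PySem.List.max?_eq_none_iff] at hm
    | some m =>
      cases hm' : PySem.List.max? (x :: ts) id with
      | none => simp [PySem.List.max?_eq_none_iff] at hm'
      | some m' =>
        have hmax := PySem.List.max?_isMax hm
        have hmax' := PySem.List.max?_isMax hm'
        have hmm := PySem.List.max?_mem hm
        have hmm' := PySem.List.max?_mem hm'
        have h1 : id m' ≤ id m := hmax m' (List.mem_cons_of_mem _ hmm')
        have hmem2 : m ∈ x :: ts := by
          rcases List.mem_cons.mp hmm with h0 | h0
          · exfalso
            have hx : t < x := h x List.mem_cons_self
            have hxm : id x ≤ id m := hmax x (List.mem_cons_of_mem _ List.mem_cons_self)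
            simp only [id] at hxm
            omega
          · exact h0
        have h2 : id m ≤ id m' := hmax' m hmem2
        simp only [id] at h1 h2
        simp only [Option.getD_some]
        omega

theorem pvL1 (l : List (Int × String)) (hp : l.Pairwise (fun p q => p.1 < q.1)) (a : Int) :
    (l.foldl pvStepV (a, none)).2
      = PySem.List.min? (pvVtimes l) id := by
  induction l generalizing a with
  | nil => rfl
  | cons p l ih =>
    rw [List.pairwise_cons] at hp
    obtain ⟨hhead, htail⟩ := hp
    by_cases hv : p.2 = "V"
    · have hstep : pvStepV (a, none) p = (a, some p.1) := by simp [pvStepV, hv]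
      rw [List.foldl_cons, hstep, pvStay]
      have hVt : pvVtimes (p :: l) = p.1 :: pvVtimes l := by
        simp [pvVtimes, List.filterMap_cons, hv]
      rw [hVt, pvMin?_cons_of_lt]
      intro x hx
      rw [pvVtimes, List.mem_filterMap] at hx
      obtain ⟨q, hq, hqx⟩ := hx
      have : x = q.1 := by
        by_cases h2 : q.2 = "V" <;> simp [h2] at hqx
        omega
      exact this ▸ hhead q hq
    · have hstep : pvStepV (a, none) p = (p.1, none) := by simp [pvStepV, hv]
      rw [List.foldl_cons, hstep, ih htail p.1]
      have hVt : pvVtimes (p :: l) = pvVtimes l := by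
        simp [pvVtimes, List.filterMap_cons, hv]
      rw [hVt]

theorem pvL2 (l : List (Int × String)) (hp : l.Pairwise (fun p q => p.1 < q.1))
    (hs : ∀ p ∈ l, p.2 = "H" ∨ p.2 = "V") (a v : Int)
    (hfv : (l.foldl pvStepV (a, none)).2 = some v) :
    (l.foldl pvStepV (a, none)).1
      = (PySem.List.max? (pvHtimesLt v l) id).getD a := by
  induction l generalizing a with
  | nil => simp at hfv
  | cons p l ih =>
    rw [List.pairwise_cons] at hp
    obtain ⟨hhead, htail⟩ := hp
    have hs' : ∀ q ∈ l, q.2 = "H" ∨ q.2 = "V" := fun q hq => hs q (List.mem_cons_of_mem _ hq)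
    by_cases hv : p.2 = "V"
    · have hstep : pvStepV (a, none) p = (a, some p.1) := by simp [pvStepV, hv]
      rw [List.foldl_cons, hstep, pvStay] at hfv ⊢
      have hvp : v = p.1 := by simpa using hfv.symm
      have hHt : pvHtimesLt v (p :: l) = [] := by
        unfold pvHtimesLt
        rw [List.filterMap_eq_nil_iff]
        intro q hq
        rcases List.mem_cons.mp hq with h0 | h0
        · subst h0; simp [hv]
        · have : ¬ (q.1 < v) := by have := hhead q h0; omega
          simp [this]
      rw [hHt]
      rfl
    · have hH : p.2 = "H" := (hs p List.mem_cons_self).resolve_right hv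
      have hstep : pvStepV (a, none) p = (p.1, none) := by simp [pvStepV, hv]
      rw [List.foldl_cons, hstep] at hfv ⊢
      have hfv' := hfv
      rw [pvL1 l htail p.1] at hfv'
      have hvmem : v ∈ pvVtimes l := PySem.List.min?_mem hfv' 
      have hvlt : p.1 < v := by
        rw [pvVtimes, List.mem_filterMap] at hvmem
        obtain ⟨q, hq, hqx⟩ := hvmem
        have : v = q.1 := by
          by_cases h2 : q.2 = "V" <;> simp [h2] at hqx
          omega
        exact this ▸ hhead q hq
      have hHt : pvHtimesLt v (p :: l) = p.1 :: pvHtimesLt v l := by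
        unfold pvHtimesLt
        rw [List.filterMap_cons]
        have hh : (p.2 == "H" && decide (p.1 < v)) = true := by
          rw [hH]; simpa using hvlt
        simp [hh]
      have hlt : ∀ x ∈ pvHtimesLt v l, p.1 < x := by
        intro x hx
        rw [pvHtimesLt, List.mem_filterMap] at hx
        obtain ⟨q, hq, hqx⟩ := hx
        have hxq : x = q.1 := by
          by_cases h2 : (q.2 == "H" && decide (q.1 < v)) = true <;> simp [h2] at hqx
          omega
        exact hxq ▸ hhead q hq
      rw [hHt, ih htail hs' p.1 hfv, pvMaxShift p.1 a _ hlt]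

-- ---- B's order loop and windows loop ----
theorem pvOrder_pair (E : List (Int × String × String)) :
    ∀ s : PySem.Set String,
      E.foldl (fun acc e =>
          if PySem.Set.contains acc.2 e.2.1 then acc
          else (acc.1 ++ [e.2.1], PySem.Set.add acc.2 e.2.1)) (s, s)
        = (E.foldl (fun s e => PySem.Set.add s e.2.1) s,
           E.foldl (fun s e => PySem.Set.add s e.2.1) s) := by
  induction E with
  | nil => intro s; rfl
  | cons e E ih =>
    intro s
    by_cases h : PySem.Set.contains s e.2.1 = true
    · have hadd : PySem.Set.add s e.2.1 = s :=
        PySem.Set.add_of_mem ((PySem.Set.contains_iff s e.2.1).mp h)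
      simp only [List.foldl_cons, h, if_true, hadd]
      exact ih s
    · have h' : PySem.Set.contains s e.2.1 = false := eq_false_of_ne_true h
      have hadd : PySem.Set.add s e.2.1 = s ++ [e.2.1] :=
        PySem.Set.add_of_not_mem (fun hm => h ((PySem.Set.contains_iff s e.2.1).mpr hm))
      simp only [List.foldl_cons, h', Bool.false_eq_true, if_false, ← hadd]
      exact ih _

theorem pvOrder_eq (E : List (Int × String × String)) : pvOrder E = pvNames E := by
  unfold pvOrder
  rw [show (([], PySem.Set.empty) : List String × PySem.Set String)
      = ((PySem.Set.empty : PySem.Set String), (PySem.Set.empty : PySem.Set String)) from rfl,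
    pvOrder_pair E PySem.Set.empty]
  show E.foldl (fun s e => PySem.Set.add s e.2.1) PySem.Set.empty = _
  unfold pvNames
  rw [PySem.Set.ofList_eq_foldl, List.foldl_map]
  rfl

def pvOutB (events : List (Int × String × String)) (n : String) :
    Option (String × Int × Int) :=
  (PySem.List.min?
      (events.filterMap (fun e => if e.2.1 == n && e.2.2 == "V" then some e.1 else none)) id).map
    (fun en => (n,
      (PySem.List.max? (events.filterMap (fun ev =>
        if ev.2.1 == n && ev.2.2 == "H" && decide (ev.1 < en) then some ev.1 else none)) id).getD 0,
      en))

theorem pvWfold (events : List (Int × String × String)) (order : List String)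
    (hnd : order.Nodup) :
    ∀ w : PySem.Dict String (Int × Int), w.keys.Nodup →
      (∀ n ∈ order, w.contains n = false) →
      (order.foldl (fun w name =>
        match PySem.List.min?
            (events.filterMap (fun e => if e.2.1 == name && e.2.2 == "V" then some e.1 else none)) id with
        | none => w
        | some en => w.insert name
            ((PySem.List.max? (events.filterMap (fun ev =>
                if ev.2.1 == name && ev.2.2 == "H" && decide (ev.1 < en) then some ev.1 else none)) id).getD 0,
              en)) w).items
        = w.items ++ order.filterMap (pvOutB events) := by
  revert hnd
  induction order with
  | nil => intro _ w _ _; simp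
  | cons n rest ih =>
    intro hnd w hk hcf
    obtain ⟨hn, hnd'⟩ := List.nodup_cons.mp hnd
    rw [List.foldl_cons, List.filterMap_cons]
    cases hmin : PySem.List.min?
        (events.filterMap (fun e => if e.2.1 == n && e.2.2 == "V" then some e.1 else none)) id with
    | none =>
      have hout : pvOutB events n = none := by unfold pvOutB; rw [hmin]; rfl
      simp only [hmin, hout]
      exact ih hnd' w hk (fun m hm => hcf m (List.mem_cons_of_mem _ hm))
    | some en =>
      have hout : pvOutB events n
          = some (n, (PySem.List.max? (events.filterMap (fun ev =>
              if ev.2.1 == n && ev.2.2 == "H" && decide (ev.1 < en) then some ev.1 else none)) id).getD 0,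
            en) := by
        unfold pvOutB; rw [hmin]; rfl
      simp only [hmin, hout]
      have hcw : w.contains n = false := hcf n List.mem_cons_self
      have hk' : (w.insert n ((PySem.List.max? (events.filterMap (fun ev =>
          if ev.2.1 == n && ev.2.2 == "H" && decide (ev.1 < en) then some ev.1 else none)) id).getD 0,
          en)).keys.Nodup := PySem.Dict.nodup_keys_insert w n _ hk
      have hcf' : ∀ m ∈ rest, (w.insert n ((PySem.List.max? (events.filterMap (fun ev =>
          if ev.2.1 == n && ev.2.2 == "H" && decide (ev.1 < en) then some ev.1 else none)) id).getD 0,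
          en)).contains m = false := by
        intro m hm
        rw [PySem.Dict.contains_insert]
        have hmn : (m == n) = false := by
          simp only [beq_eq_false_iff_ne, ne_eq]
          intro hEq
          exact hn (hEq ▸ hm)
        rw [hmn, hcf m (List.mem_cons_of_mem _ hm)]
        rfl
      rw [ih hnd' _ hk' hcf', PySem.Dict.items_insert_of_not_contains w _ hcw,
        List.append_assoc]
      rfl

-- ---- per-name: B's queries equal the abstract value ----
theorem pvEntry (E : List (Int × String × String)) (n : String)
    (hpE : E.Pairwise (fun a b => a.2.1 ≠ b.2.1 ∨ a.1 < b.1))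
    (hHV : ∀ e ∈ E, e.2.2 = "H" ∨ e.2.2 = "V") :
    pvOutB E n = (pvVal (pvProj E n)).2.map (fun v => (n, (pvVal (pvProj E n)).1, v)) := by
  have hVq : E.filterMap (fun e => if e.2.1 == n && e.2.2 == "V" then some e.1 else none)
      = pvVtimes (pvProj E n) := by
    unfold pvVtimes pvProj
    rw [List.filterMap_filterMap]
    apply List.filterMap_congr
    intro e _
    by_cases h1 : e.2.1 = n <;> by_cases h2 : e.2.2 = "V" <;> simp [h1, h2]
  have hHq : ∀ v : Int, E.filterMap (fun ev =>
        if ev.2.1 == n && ev.2.2 == "H" && decide (ev.1 < v) then some ev.1 else none)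
      = pvHtimesLt v (pvProj E n) := by
    intro v
    unfold pvHtimesLt pvProj
    rw [List.filterMap_filterMap]
    apply List.filterMap_congr
    intro e _
    by_cases h1 : e.2.1 = n <;> by_cases h2 : e.2.2 = "H" <;> by_cases h3 : e.1 < v <;>
      simp [h1, h2, h3]
  have hpn : (pvProj E n).Pairwise (fun p q => p.1 < q.1) := by
    have hpe : pvProj E n = (E.filter (fun e => e.2.1 == n)).map (fun e => (e.1, e.2.2)) := by
      unfold pvProj
      rw [pvFilterMapIf E (fun e => e.2.1 == n) (fun e => (e.1, e.2.2))]
    rw [hpe, List.pairwise_map]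
    refine List.Pairwise.imp_of_mem ?_ (hpE.filter (fun e => e.2.1 == n))
    intro a b ha hb hr
    have ha' : a.2.1 = n := by simpa using (List.mem_filter.mp ha).2
    have hb' : b.2.1 = n := by simpa using (List.mem_filter.mp hb).2
    rcases hr with h | h
    · exact absurd (ha'.trans hb'.symm) h
    · exact h
  have hsn : ∀ p ∈ pvProj E n, p.2 = "H" ∨ p.2 = "V" := by
    intro p hp
    unfold pvProj at hp
    rw [List.mem_filterMap] at hp
    obtain ⟨e, he, hpe⟩ := hp
    by_cases h1 : e.2.1 = n
    · simp only [h1, BEq.rfl, if_true, Option.some.injEq] at hpe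
      subst hpe
      exact hHV e he
    · simp [h1] at hpe
  unfold pvOutB
  rw [hVq]
  simp only [hHq]
  have h1 : (pvVal (pvProj E n)).2 = PySem.List.min? (pvVtimes (pvProj E n)) id :=
    pvL1 (pvProj E n) hpn 0
  rw [← h1]
  cases hfv : (pvVal (pvProj E n)).2 with
  | none => rfl
  | some v =>
    have h2 : (pvVal (pvProj E n)).1
        = (PySem.List.max? (pvHtimesLt v (pvProj E n)) id).getD 0 :=
      pvL2 (pvProj E n) hpn hsn 0 v hfv
    simp only [Option.map_some]
    rw [h2]

-- ---- the event list is pairwise increasing per name, with only H/V statuses ----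
theorem pvEventsHV (vks : List (List (String × String))) :
    ∀ e ∈ pvEvents vks, e.2.2 = "H" ∨ e.2.2 = "V" := by
  intro e he
  unfold pvEvents at he
  rw [List.mem_flatMap] at he
  obtain ⟨tv, -, hin⟩ := he
  rw [List.mem_filterMap] at hin
  obtain ⟨p, -, hp⟩ := hin
  cases hc : (p.2 == "H" || p.2 == "V") with
  | false => rw [hc] at hp; simp at hp
  | true =>
    rw [hc] at hp
    simp only [if_true, Option.some.injEq] at hp
    subst hp
    rcases Bool.or_eq_true_iff.mp hc with h | h
    · exact Or.inl (eq_of_beq h)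
    · exact Or.inr (eq_of_beq h)

theorem pvEventsPairwise (vks : List (List (String × String)))
    (hpre : Pre_find_infection_windows vks) :
    (pvEvents vks).Pairwise (fun a b => a.2.1 ≠ b.2.1 ∨ a.1 < b.1) := by
  unfold pvEvents
  rw [List.pairwise_flatMap]
  constructor
  · intro tv htv
    have hnodup : (tv.2.map Prod.fst).Nodup := by
      rw [PySem.List.enumerate_eq_map_pyRange vks [], List.mem_map] at htv
      obtain ⟨j, hj, rfl⟩ := htv
      rw [PySem.List.mem_pyRange_one] at hj
      have hlen : j < (vks.length : Int) := by simpa [PySem.List.len] using hj.2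
      have hmem : PySem.List.pyGetD vks j [] ∈ vks := by
        rw [PySem.List.pyGetD_eq_getElem vks [] hj.1 hlen]
        exact List.getElem_mem _
      exact hpre _ hmem
    rw [pvFilterMapIf tv.2 (fun p => p.2 == "H" || p.2 == "V") (fun p => (tv.1, p.1, p.2)),
      List.pairwise_map]
    have h0 : tv.2.Pairwise (fun p q => p.1 ≠ q.1) := by
      have hnd := hnodup
      rw [List.Nodup, List.pairwise_map] at hnd
      exact hnd
    exact (h0.filter _).imp (fun h => Or.inl h)
  · have henum : (PySem.List.enumerate vks).Pairwise (fun a b => a.1 < b.1) := by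
      rw [PySem.List.enumerate_eq_map_pyRange vks [], List.pairwise_map]
      exact (PySem.List.pairwise_lt_pyRange_one 0 (PySem.List.len vks)).imp (fun h => h)
    refine henum.imp ?_
    intro a b hab x hx y hy
    rw [List.mem_filterMap] at hx hy
    obtain ⟨p, -, hp⟩ := hx
    obtain ⟨q, -, hq⟩ := hy
    have hx1 : x.1 = a.1 := by
      cases hc : (p.2 == "H" || p.2 == "V") with
      | false => rw [hc] at hp; simp at hp
      | true =>
        rw [hc] at hp
        simp only [if_true, Option.some.injEq] at hp
        rw [← hp]
    have hy1 : y.1 = b.1 := by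
      cases hc : (q.2 == "H" || q.2 == "V") with
      | false => rw [hc] at hq; simp at hq
      | true =>
        rw [hc] at hq
        simp only [if_true, Option.some.injEq] at hq
        rw [← hq]
    exact Or.inr (by rw [hx1, hy1]; exact hab)

-- ===== VERDICT (by name: the statement is the Claim_ definition above) =====
theorem find_infection_windows_spec : Claim_equal_find_infection_windows := by
  intro vks _ hpre
  unfold Spec_find_infection_windows
  rw [pvAchar vks hpre, pvSB_eq, pvInv _ (pvEventsHV vks), List.filterMap_map]
  show _ = find_infection_windows_alt vks
  simp only [find_infection_windows_alt]
  rw [pvOrder_eq,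
    pvWfold (pvEvents vks) (pvNames (pvEvents vks)) (pvNames_nodup _)
      PySem.Dict.empty PySem.Dict.nodup_keys_empty
      (fun n _ => PySem.Dict.contains_empty n)]
  rw [show (PySem.Dict.empty : PySem.Dict String (Int × Int)).items = [] from rfl,
    List.nil_append]
  exact List.filterMap_congr fun n _ =>
    (pvEntry (pvEvents vks) n (pvEventsPairwise vks hpre) (pvEventsHV vks)).symm
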